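-- pv_equiv track=rewrite | github.com/jahidulzaid/CP-Problem-Solving | June 25/B_Maximum_Multiple_Sum.py | max_multiple_sum_x
-- ===== SOURCE A (Python) =====
-- def max_multiple_sum_x(n):
--     max_sum = 0
--     best_x = 2
--     for x in range(2, n + 1):
--         k = n // x
--         total = x * k * (k + 1) // 2
--         if total > max_sum:
--             max_sum = total
--             best_x = x
--     return best_x
-- ===== SOURCE B (Python) =====
-- def max_multiple_sum_x(n):
--     # Closed form: for n >= 4 (and n <= 2) x = 2 gives the strictly largest
--     # sum of multiples; the only exception is n == 3, where x = 3 wins.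
--     return 3 if n == 3 else 2
-- ===== Notes on version B (the rewrite author's own statement) =====
-- stated objective: faster
-- what changed: Replaced the O(n) scan over all candidate divisors with a proved closed form: the answer is 3 when n equals 3 and 2 otherwise, since x = 2 dominates every other candidate whenever more than one multiple fits.
import Mathlib
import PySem

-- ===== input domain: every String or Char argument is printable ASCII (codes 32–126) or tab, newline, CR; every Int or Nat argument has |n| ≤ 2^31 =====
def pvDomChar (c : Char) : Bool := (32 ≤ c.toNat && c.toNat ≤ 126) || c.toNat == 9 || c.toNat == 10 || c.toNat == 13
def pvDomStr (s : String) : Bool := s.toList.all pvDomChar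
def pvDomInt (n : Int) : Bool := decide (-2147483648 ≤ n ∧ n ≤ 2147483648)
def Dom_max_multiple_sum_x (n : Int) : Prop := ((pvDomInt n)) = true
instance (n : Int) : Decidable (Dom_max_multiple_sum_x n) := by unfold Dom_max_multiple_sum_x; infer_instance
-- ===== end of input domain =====

-- B replaces A's O(n) scan over x ∈ [2,n] by the proved closed form: 3 for n = 3, else 2 (objective: faster).

-- ===== PORT A =====
-- one loop iteration of A: k = n // x; total = x*k*(k+1) // 2; update (max_sum, best_x) if total > max_sum
def pvStepA (n : Int) (s : Int × Int) (x : Int) : Int × Int :=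
  let k := PySem.Int.floordiv n x
  let total := PySem.Int.floordiv (x * k * (k + 1)) 2
  if s.1 < total then (total, x) else s

def max_multiple_sum_x (n : Int) : Int :=
  ((PySem.List.pyRange 2 (n + 1) 1).foldl (pvStepA n) (0, 2)).2

-- ===== PORT B =====
def max_multiple_sum_x_alt (n : Int) : Int :=
  if n = 3 then 3 else 2

-- ===== PRECONDITION & SPEC =====
def Spec_max_multiple_sum_x (n : Int) (out : Int) : Prop := out = max_multiple_sum_x_alt n
instance (n : Int) (out : Int) : Decidable (Spec_max_multiple_sum_x n out) := by unfold Spec_max_multiple_sum_x; infer_instance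

-- ===== CLAIM (what is proved, stated in full; the proofs are below) =====
def Claim_equal_max_multiple_sum_x : Prop := ∀ (n : Int), Dom_max_multiple_sum_x n → Spec_max_multiple_sum_x n (max_multiple_sum_x n)

-- ===== LEMMAS AND PROOFS =====

-- if no element of l can beat the current max_sum, the fold leaves the state unchanged
lemma pv_foldl_noup (n : Int) (l : List Int) (ms b : Int)
    (h : ∀ x ∈ l,
      PySem.Int.floordiv (x * PySem.Int.floordiv n x * (PySem.Int.floordiv n x + 1)) 2 ≤ ms) :
    l.foldl (pvStepA n) (ms, b) = (ms, b) := by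
  induction l with
  | nil => rfl
  | cons a t ih =>
    have ha := h a (by simp)
    have hstep : pvStepA n (ms, b) a = (ms, b) := by
      simp only [pvStepA]
      rw [if_neg (by omega)]
    rw [List.foldl_cons, hstep, ih (fun x hx => h x (by simp [hx]))]

-- key inequality: for n ≥ 7 and 3 ≤ x ≤ n, the total at x never exceeds m*(m+1), m = n//2
lemma pv_key (n x : Int) (hn : 7 ≤ n) (hx3 : 3 ≤ x) (_hxn : x < n + 1) :
    PySem.Int.floordiv (x * PySem.Int.floordiv n x * (PySem.Int.floordiv n x + 1)) 2
      ≤ PySem.Int.floordiv n 2 * (PySem.Int.floordiv n 2 + 1) := by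
  rw [PySem.Int.floordiv_eq_ediv_of_pos (by omega : (0:Int) < x)]
  simp only [PySem.Int.floordiv_eq_ediv_of_pos (show (0:Int) < 2 by norm_num)]
  set k := n / x with hk
  set m := n / 2 with hm
  have hxk : x * k ≤ n := by
    rw [hk]
    have h2 := Int.mul_ediv_add_emod n x
    have h3 := Int.emod_nonneg n (by omega : x ≠ 0)
    omega
  have hk0 : 0 ≤ k := Int.ediv_nonneg (by omega) (by omega)
  have h3k : 3 * k ≤ n := le_trans (by nlinarith) hxk
  have hm1 : n - 1 ≤ 2 * m := by
    rw [hm]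
    have h2 := Int.mul_ediv_add_emod n 2
    have h3 := Int.emod_lt_of_pos n (by norm_num : (0:Int) < 2)
    have h4 := Int.emod_nonneg n (by norm_num : (2:Int) ≠ 0)
    omega
  have hgoal : x * k * (k + 1) ≤ 2 * (m * (m + 1)) := by
    have h1 : x * k * (k + 1) ≤ n * (k + 1) :=
      mul_le_mul_of_nonneg_right hxk (by omega)
    have h2 : 6 * (n * k) ≤ 2 * (n * n) := by nlinarith
    have h3 : (n - 1) * (n + 1) ≤ 2 * m * (2 * m + 2) := by nlinarith
    nlinarith
  calc x * k * (k + 1) / 2 ≤ 2 * (m * (m + 1)) / 2 :=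
        Int.ediv_le_ediv (by norm_num) hgoal
    _ = m * (m + 1) := Int.mul_ediv_cancel_left _ (by norm_num)

lemma pv_main (n : Int) : max_multiple_sum_x n = max_multiple_sum_x_alt n := by
  by_cases hsmall : n ≤ 1
  · unfold max_multiple_sum_x max_multiple_sum_x_alt
    rw [PySem.List.pyRange_one_eq_nil (by omega)]
    rw [if_neg (by omega)]
    rfl
  · by_cases hmid : n ≤ 6
    · interval_cases n <;> decide
    · -- n ≥ 7
      have hn : 7 ≤ n := by omega
      unfold max_multiple_sum_x max_multiple_sum_x_alt
      rw [PySem.List.pyRange_one_cons (by omega : (2:Int) < n + 1), List.foldl_cons]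
      have hk2 : PySem.Int.floordiv n 2 = n / 2 :=
        PySem.Int.floordiv_eq_ediv_of_pos (by norm_num)
      have hm3 : 3 ≤ n / 2 := by omega
      have hfirst : pvStepA n (0, 2) 2 =
          (PySem.Int.floordiv n 2 * (PySem.Int.floordiv n 2 + 1), 2) := by
        simp only [pvStepA]
        have htot : PySem.Int.floordiv
            (2 * PySem.Int.floordiv n 2 * (PySem.Int.floordiv n 2 + 1)) 2
            = PySem.Int.floordiv n 2 * (PySem.Int.floordiv n 2 + 1) := by
          rw [PySem.Int.floordiv_eq_ediv_of_pos (by norm_num : (0:Int) < 2), hk2,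
              mul_assoc, Int.mul_ediv_cancel_left _ (by norm_num)]
        rw [htot, if_pos (by rw [hk2]; nlinarith)]
      rw [hfirst,
          pv_foldl_noup n _ _ _ (fun x hx => by
            rw [PySem.List.mem_pyRange_one] at hx
            exact pv_key n x hn hx.1 hx.2)]
      rw [if_neg (by omega)]

-- ===== VERDICT (by name: the statement is the Claim_ definition above) =====
theorem max_multiple_sum_x_spec : Claim_equal_max_multiple_sum_x := by
  intro n _
  exact pv_main n
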